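-- pv_equiv track=rewrite | github.com/jonaselgammal/Graphsmith | graphsmith/type_system.py | _has_unbalanced_angles
-- ===== SOURCE A (Python) =====
-- def _has_unbalanced_angles(text: str) -> bool:
--     depth = 0
--     for ch in text:
--         if ch == "<":
--             depth += 1
--         elif ch == ">":
--             depth -= 1
--             if depth < 0:
--                 return True
--     return depth != 0
-- ===== SOURCE B (Python) =====
-- def _has_unbalanced_angles(text: str) -> bool:
--     s = ''.join(c for c in text if c in '<>')
--     while '<>' in s:
--         s = s.replace('<>', '')
--     return s != ''
-- ===== Notes on version B (the rewrite author's own statement) =====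
-- stated objective: alternative
-- what changed: Replaces the depth counter with early exit by a rewriting reduction: filter the string down to its angle brackets, repeatedly cancel adjacent matched bracket pairs via str.replace, and report unbalanced iff a nonempty residue remains.
import Mathlib
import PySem

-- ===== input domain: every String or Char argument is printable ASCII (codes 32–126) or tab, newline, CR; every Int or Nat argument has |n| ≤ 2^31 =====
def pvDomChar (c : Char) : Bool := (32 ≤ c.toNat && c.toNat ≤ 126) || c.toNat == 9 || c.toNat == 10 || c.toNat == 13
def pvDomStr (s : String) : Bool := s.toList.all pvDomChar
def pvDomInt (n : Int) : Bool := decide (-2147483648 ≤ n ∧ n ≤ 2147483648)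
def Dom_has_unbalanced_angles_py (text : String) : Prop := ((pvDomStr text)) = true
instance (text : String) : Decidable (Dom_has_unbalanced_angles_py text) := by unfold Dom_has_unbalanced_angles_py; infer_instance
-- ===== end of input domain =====

-- B replaces A's depth counter (with early return) by a rewriting reduction:
-- filter to the angle brackets, repeatedly cancel adjacent '<>' pairs, unbalanced iff
-- a nonempty residue remains. Same return value on every input; B is not faster.

-- ===== PORT A =====
-- A's for-loop over the characters, state = depth, early return True when depth < 0.
def pvALoop : Int → List Char → Bool
  | depth, [] => depth ≠ 0
  | depth, ch :: rest =>
    if ch = '<' then pvALoop (depth + 1) rest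
    else if ch = '>' then
      if depth - 1 < 0 then true else pvALoop (depth - 1) rest
    else pvALoop depth rest

def has_unbalanced_angles_py (text : String) : Bool := pvALoop 0 text.toList

-- ===== PORT B =====
-- one pass of s.replace('<>', ''): remove all non-overlapping adjacent '<>' pairs, left to right
def pvRemovePairs : List Char → List Char
  | [] => []
  | [c] => [c]
  | a :: b :: rest =>
    if a = '<' && b = '>' then pvRemovePairs rest else a :: pvRemovePairs (b :: rest)

-- '<>' in s
def pvHasPair : List Char → Bool
  | [] => false
  | [_] => false
  | a :: b :: rest => (a = '<' && b = '>') || pvHasPair (b :: rest)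

theorem pvRemovePairs_length_le (s : List Char) :
    (pvRemovePairs s).length ≤ s.length := by
  fun_induction pvRemovePairs s <;> simp_all <;> omega

theorem pvRemovePairs_length_lt (s : List Char) (h : pvHasPair s = true) :
    (pvRemovePairs s).length < s.length := by
  fun_induction pvRemovePairs s with
  | case1 => simp [pvHasPair] at h
  | case2 c => simp [pvHasPair] at h
  | case3 a b rest hp =>
    have := pvRemovePairs_length_le rest
    simp only [List.length_cons]
    omega
  | case4 a b rest hp ih =>
    have hpr : pvHasPair (b :: rest) = true := by
      simp only [pvHasPair] at h
      simpa [hp] using h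
    have := ih hpr
    simp only [List.length_cons] at this ⊢
    omega

-- while '<>' in s: s = s.replace('<>', '')
def pvCancelLoop (s : List Char) : List Char :=
  if h : pvHasPair s = true then pvCancelLoop (pvRemovePairs s) else s
termination_by s.length
decreasing_by exact pvRemovePairs_length_lt s h

def has_unbalanced_angles_py_alt (text : String) : Bool :=
  let s := text.toList.filter (fun c => c = '<' || c = '>')
  pvCancelLoop s ≠ []

-- ===== PRECONDITION & SPEC =====
def Spec_has_unbalanced_angles_py (text : String) (out : Bool) : Prop := out = has_unbalanced_angles_py_alt text
instance (text : String) (out : Bool) : Decidable (Spec_has_unbalanced_angles_py text out) := by unfold Spec_has_unbalanced_angles_py; infer_instance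

-- ===== CLAIM (what is proved, stated in full; the proofs are below) =====
def Claim_equal_has_unbalanced_angles_py : Prop := ∀ (text : String), Dom_has_unbalanced_angles_py text → Spec_has_unbalanced_angles_py text (has_unbalanced_angles_py text)

-- ===== LEMMAS AND PROOFS =====

theorem pvALoop_cons_lt (d : Int) (rest : List Char) :
    pvALoop d ('<' :: rest) = pvALoop (d + 1) rest := by
  simp [pvALoop]

theorem pvALoop_cons_gt (d : Int) (rest : List Char) :
    pvALoop d ('>' :: rest) = if d - 1 < 0 then true else pvALoop (d - 1) rest := by
  rw [pvALoop, if_neg (by decide : ¬ ('>' : Char) = '<'), if_pos rfl]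

theorem pvALoop_cons_other (d : Int) (c : Char) (rest : List Char)
    (h1 : c ≠ '<') (h2 : c ≠ '>') : pvALoop d (c :: rest) = pvALoop d rest := by
  simp [pvALoop, h1, h2]

-- A's loop ignores non-bracket characters, so it may be run on the filtered list.
theorem pvALoop_filter (s : List Char) : ∀ d : Int,
    pvALoop d (s.filter (fun c => c = '<' || c = '>')) = pvALoop d s := by
  induction s with
  | nil => intro d; rfl
  | cons c rest ih =>
    intro d
    by_cases h1 : c = '<'
    · simp only [h1, List.filter_cons]
      simp [pvALoop_cons_lt, ih]
    · by_cases h2 : c = '>'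
      · simp only [h2, List.filter_cons]
        simp [pvALoop_cons_gt, ih]
      · simp only [List.filter_cons, h1, h2]
        simp [pvALoop_cons_other d c _ h1 h2, ih]

-- cancelling adjacent '<>' pairs does not change A's verdict (for nonnegative depth)
theorem pvALoop_removePairs (s : List Char) : ∀ d : Int, 0 ≤ d →
    pvALoop d (pvRemovePairs s) = pvALoop d s := by
  fun_induction pvRemovePairs s with
  | case1 => intro d _; rfl
  | case2 c => intro d _; rfl
  | case3 a b rest hp ih =>
    intro d hd
    obtain ⟨ha, hb⟩ : a = '<' ∧ b = '>' := by simpa using hp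
    subst ha hb
    rw [ih d hd, pvALoop_cons_lt, pvALoop_cons_gt,
        if_neg (by omega : ¬ d + 1 - 1 < 0), show d + 1 - 1 = d from by omega]
  | case4 a b rest hp ih =>
    intro d hd
    by_cases hc : a = '<'
    · subst hc
      rw [pvALoop_cons_lt, pvALoop_cons_lt, ih (d + 1) (by omega)]
    · by_cases hg : a = '>'
      · subst hg
        rw [pvALoop_cons_gt, pvALoop_cons_gt]
        split_ifs
        · rfl
        · exact ih (d - 1) (by omega)
      · rw [pvALoop_cons_other d a _ hc hg, pvALoop_cons_other d a _ hc hg, ih d hd]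

-- if every character is '<', A's loop from a nonnegative depth returns true on nonempty input
theorem pvALoop_all_lt (s : List Char) : ∀ d : Int, 0 ≤ d → (∀ c ∈ s, c = '<') →
    s ≠ [] → pvALoop d s = true := by
  induction s with
  | nil => intro d _ _ h; exact absurd rfl h
  | cons c rest ih =>
    intro d hd hall _
    have hc : c = '<' := hall c List.mem_cons_self
    subst hc
    rw [pvALoop_cons_lt]
    cases rest with
    | nil => simp [pvALoop]; omega
    | cons e t =>
      exact ih (d + 1) (by omega) (fun x hx => hall x (List.mem_cons_of_mem _ hx)) (by simp)

-- if '<'::rest has no adjacent pair and only brackets, rest is all '<'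
theorem pvNoPair_after_lt (rest : List Char) :
    (∀ c ∈ rest, c = '<' ∨ c = '>') → pvHasPair ('<' :: rest) = false →
    ∀ c ∈ rest, c = '<' := by
  induction rest with
  | nil => intro _ _ c hc; simp at hc
  | cons d t ih =>
    intro hall hnp c hc
    have hd : d = '<' := by
      rcases hall d List.mem_cons_self with h | h
      · exact h
      · exfalso; rw [h] at hnp; simp [pvHasPair] at hnp
    have hnp' : pvHasPair ('<' :: t) = false := by
      rw [hd] at hnp
      simp only [pvHasPair] at hnp ⊢
      simpa using hnp
    rw [List.mem_cons] at hc
    rcases hc with hc | hc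
    · exact hd ▸ hc
    · exact ih (fun x hx => hall x (List.mem_cons_of_mem _ hx)) hnp' c hc

-- terminal state of B's loop: only brackets, no adjacent pair ⇒ A's verdict is "nonempty"
theorem pvALoop_terminal (s : List Char) (hall : ∀ c ∈ s, c = '<' ∨ c = '>')
    (hnp : pvHasPair s = false) : pvALoop 0 s = decide (s ≠ []) := by
  cases s with
  | nil => simp [pvALoop]
  | cons c rest =>
    rcases hall c List.mem_cons_self with hc | hc
    · subst hc
      have hall' : ∀ x ∈ ('<' :: rest), x = '<' := by
        intro x hx
        rw [List.mem_cons] at hx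
        rcases hx with hx | hx
        · exact hx
        · exact pvNoPair_after_lt rest (fun y hy => hall y (List.mem_cons_of_mem _ hy)) hnp x hx
      simp [pvALoop_all_lt ('<' :: rest) 0 le_rfl hall' (by simp)]
    · subst hc
      rw [pvALoop_cons_gt]
      simp

-- pvRemovePairs preserves "only brackets"
theorem pvRemovePairs_brackets (s : List Char) (hall : ∀ c ∈ s, c = '<' ∨ c = '>') :
    ∀ c ∈ pvRemovePairs s, c = '<' ∨ c = '>' := by
  fun_induction pvRemovePairs s with
  | case1 => intro c hc; simp at hc
  | case2 c => intro x hx; exact hall x hx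
  | case3 a b rest hp ih =>
    exact ih (fun x hx => hall x (List.mem_cons_of_mem _ (List.mem_cons_of_mem _ hx)))
  | case4 a b rest hp ih =>
    intro x hx
    rw [List.mem_cons] at hx
    rcases hx with hx | hx
    · exact hall x (by rw [hx]; exact List.mem_cons_self)
    · exact ih (fun y hy => hall y (List.mem_cons_of_mem _ hy)) x hx

-- B's loop computes A's verdict on any all-bracket list
theorem pvCancelLoop_eq (s : List Char) (hall : ∀ c ∈ s, c = '<' ∨ c = '>') :
    decide (pvCancelLoop s ≠ []) = pvALoop 0 s := by
  fun_induction pvCancelLoop s with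
  | case1 s h ih =>
    rw [ih (pvRemovePairs_brackets s hall), pvALoop_removePairs s 0 le_rfl]
  | case2 s h =>
    rw [pvALoop_terminal s hall (by simpa using h)]

-- ===== VERDICT (by name: the statement is the Claim_ definition above) =====
theorem has_unbalanced_angles_py_spec : Claim_equal_has_unbalanced_angles_py := by
  intro text _
  unfold Spec_has_unbalanced_angles_py has_unbalanced_angles_py has_unbalanced_angles_py_alt
  rw [← pvALoop_filter text.toList 0]
  rw [← pvCancelLoop_eq (text.toList.filter (fun c => c = '<' || c = '>'))
        (by intro c hc; simpa using (List.mem_filter.mp hc).2)]
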